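-- pv_equiv track=rewrite | github.com/moontr3/prfr | braille_tools/basic.py | binary_to_braille
-- ===== SOURCE A (Python) =====
-- def binary_to_braille(
--     pattern: "list[int | bool]",
--     grid: bool = True
-- ) -> str:
--     '''
--     Converts a list of binary elements to a unicode braille character.
--
--     If `grid` is set to True, dots go from top left to bottom
--     right.
--
--     If `grid` is set to False, the positions of the dots correlate to
--     the pattern as follows:
--     - First 6 elements represent the top 2x3 zone of a braille character,
--     from top left to bottom right.
--     - Other 2 elements represent the two bottom dots. If they're omitted,
--     they get replaced with 0, 0.
--     '''
--     assert len(pattern) in [6,8],\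
--         'Length of the pattern must be either 6 or 8.'
--
--     # converting grid to unicode representation
--     if grid:
--         indices = [0, 2, 4, 1, 3, 5, 6, 7][0:len(pattern)]
--         pattern = [pattern[i] for i in indices]
--
--     # converting pattern to unicode
--     pattern = "".join(["1" if i else "0" for i in pattern][::-1])
--     char = 0x2800+int(pattern, 2)
--     return chr(char)
-- ===== SOURCE B (Python) =====
-- def binary_to_braille(
--     pattern: "list[int | bool]",
--     grid: bool = True
-- ) -> str:
--     assert len(pattern) in [6,8],\
--         'Length of the pattern must be either 6 or 8.'
--     # bit weight of each pattern position; grid=True folds the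
--     # [0,2,4,1,3,5,6,7] permutation into the table
--     weights = [1, 8, 2, 16, 4, 32, 64, 128] if grid \
--         else [1, 2, 4, 8, 16, 32, 64, 128]
--     code = 0x2800
--     for w, v in zip(weights, pattern):
--         if v:
--             code += w
--     return chr(code)
-- ===== Notes on version B (the rewrite author's own statement) =====
-- stated objective: simpler
-- what changed: Replaces A's permute-list/build-binary-string/int(...,2)-parse pipeline by a single weighted-sum pass over the pattern, with the grid permutation folded into a per-position bit-weight table.
import Mathlib
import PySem

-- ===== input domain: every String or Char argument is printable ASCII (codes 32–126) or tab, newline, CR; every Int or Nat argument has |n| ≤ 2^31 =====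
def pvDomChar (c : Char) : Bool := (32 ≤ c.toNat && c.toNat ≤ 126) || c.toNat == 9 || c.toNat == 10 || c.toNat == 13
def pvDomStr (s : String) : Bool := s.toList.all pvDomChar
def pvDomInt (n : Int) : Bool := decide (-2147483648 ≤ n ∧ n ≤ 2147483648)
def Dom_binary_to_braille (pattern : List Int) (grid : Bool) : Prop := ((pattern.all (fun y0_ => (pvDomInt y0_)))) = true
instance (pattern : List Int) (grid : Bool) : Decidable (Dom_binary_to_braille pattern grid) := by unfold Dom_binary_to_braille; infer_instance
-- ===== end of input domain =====

-- B replaces A's permute/stringify/int-parse pipeline by one weighted-sum pass with the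
-- grid permutation folded into a weight table (objective: simpler; same cost).

-- ===== PORT A =====
-- hand port of int(s, 2) for a string made of '0'/'1' characters (exact there;
-- under Pre_ the string A builds consists of such characters only)
def pvParseBin (s : List Char) : Int :=
  s.foldl (fun acc c => acc * 2 + (if c = '1' then 1 else 0)) 0

def binary_to_braille (pattern : List Int) (grid : Bool) : String :=
  -- pattern = [pattern[i] for i in [0,2,4,1,3,5,6,7][0:len(pattern)]]
  -- (every index is in range under Pre_, so the IndexError default 0 is never used)
  let pattern1 : List Int :=
    if grid then
      (PySem.List.slice ([0, 2, 4, 1, 3, 5, 6, 7] : List Int) (some 0) (some (pattern.length : Int))).map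
        (fun i => (PySem.List.pyGet? pattern i).getD 0)
    else pattern
  -- "".join(["1" if i else "0" for i in pattern][::-1])
  let s : List Char := (pattern1.map (fun i => if i ≠ 0 then '1' else '0')).reverse
  -- char = 0x2800 + int(pattern, 2); return chr(char)  (codepoint is a valid Char here)
  let char : Int := 0x2800 + pvParseBin s
  String.ofList [Char.ofNat char.toNat]

-- ===== PORT B =====
def binary_to_braille_alt (pattern : List Int) (grid : Bool) : String :=
  let weights : List Int :=
    if grid then [1, 8, 2, 16, 4, 32, 64, 128] else [1, 2, 4, 8, 16, 32, 64, 128]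
  let code : Int :=
    (weights.zip pattern).foldl (fun acc wv => if wv.2 ≠ 0 then acc + wv.1 else acc) 0x2800
  String.ofList [Char.ofNat code.toNat]

-- ===== PRECONDITION & SPEC =====
-- A asserts the length is 6 or 8 (AssertionError otherwise); Pre_ is exactly that.
def Pre_binary_to_braille (pattern : List Int) (grid : Bool) : Prop :=
  pattern.length = 6 ∨ pattern.length = 8
instance (pattern : List Int) (grid : Bool) : Decidable (Pre_binary_to_braille pattern grid) := by
  unfold Pre_binary_to_braille; infer_instance

def pvWitness_binary_to_braille : List Int × Bool := ([1, 0, 0, 1, 0, 1], true)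

def Spec_binary_to_braille (pattern : List Int) (grid : Bool) (out : String) : Prop := out = binary_to_braille_alt pattern grid
instance (pattern : List Int) (grid : Bool) (out : String) : Decidable (Spec_binary_to_braille pattern grid out) := by unfold Spec_binary_to_braille; infer_instance

-- ===== CLAIM (what is proved, stated in full; the proofs are below) =====
def Claim_equal_binary_to_braille : Prop := ∀ (pattern : List Int) (grid : Bool), Dom_binary_to_braille pattern grid → Pre_binary_to_braille pattern grid → Spec_binary_to_braille pattern grid (binary_to_braille pattern grid)

-- ===== LEMMAS AND PROOFS =====

set_option maxHeartbeats 4000000 in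
-- ===== VERDICT (by name: the statement is the Claim_ definition above) =====
theorem binary_to_braille_spec : Claim_equal_binary_to_braille := by
  intro pattern grid _ hpre
  unfold Spec_binary_to_braille
  rcases pattern with _ | ⟨a, _ | ⟨b, _ | ⟨c, _ | ⟨d, _ | ⟨e, _ | ⟨f, rest⟩⟩⟩⟩⟩⟩ <;>
    simp [Pre_binary_to_braille] at hpre
  · -- rest has length 0 or 2
    rcases rest with _ | ⟨g7, _ | ⟨g8, _ | ⟨x, rest'⟩⟩⟩ <;> simp at hpre <;>
      cases grid <;>
        (simp [binary_to_braille, binary_to_braille_alt, pvParseBin,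
               PySem.List.slice, PySem.List.pyGet?, PySem.List.pyIdx?] <;>
         split_ifs <;> decide)
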